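-- pv_equiv track=rewrite | github.com/AatishLanghee/Python_Practice | LBP027_sequence_sum.py | calc_sequence_sum
-- ===== SOURCE A (Python) =====
-- def calc_sequence_sum(i: int, j: int, k: int) -> int:
--     sum_: int = 0
--
--     while i <= j:
--         sum_ = sum_ + i
--         i += 1
--     j = j - 1
--     while j >= k:
--         sum_ = sum_ + j
--         j -= 1
--     return sum_
-- ===== SOURCE B (Python) =====
-- def calc_sequence_sum(i: int, j: int, k: int) -> int:
--     def range_sum(a: int, b: int) -> int:
--         # sum of integers a..b inclusive, 0 if empty
--         if a <= b:
--             return (a + b) * (b - a + 1) // 2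
--         return 0
--     return range_sum(i, j) + range_sum(k, j - 1)
-- ===== Notes on version B (the rewrite author's own statement) =====
-- stated objective: faster
-- what changed: Replaced the two counting while-loops with the closed-form arithmetic-series formula (a+b)*(b-a+1)//2 for each range, with an empty-range guard: O(1) vs O(j-i + j-k).
import Mathlib
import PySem

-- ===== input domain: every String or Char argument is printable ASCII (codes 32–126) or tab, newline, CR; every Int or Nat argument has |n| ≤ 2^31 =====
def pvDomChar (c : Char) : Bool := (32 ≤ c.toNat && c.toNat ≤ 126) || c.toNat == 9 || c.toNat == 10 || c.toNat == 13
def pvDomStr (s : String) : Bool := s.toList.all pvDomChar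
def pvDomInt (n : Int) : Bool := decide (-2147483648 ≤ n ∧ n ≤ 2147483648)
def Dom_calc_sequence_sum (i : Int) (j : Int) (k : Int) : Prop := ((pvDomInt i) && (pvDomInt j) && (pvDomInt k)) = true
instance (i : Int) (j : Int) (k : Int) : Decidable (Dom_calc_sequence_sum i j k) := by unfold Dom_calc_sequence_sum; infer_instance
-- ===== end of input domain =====

-- B replaces A's two counting while-loops by the closed-form arithmetic-series formula for each range (objective: faster; a timing run measured B faster at the largest size).

-- ===== PORT A =====
-- first while loop: while i <= j: sum_ += i; i += 1
def pvLoopUp (i j sum_ : Int) : Int :=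
  if i ≤ j then pvLoopUp (i + 1) j (sum_ + i) else sum_
termination_by (j + 1 - i).toNat
decreasing_by omega

-- second while loop: while j >= k: sum_ += j; j -= 1
def pvLoopDown (j k sum_ : Int) : Int :=
  if j ≥ k then pvLoopDown (j - 1) k (sum_ + j) else sum_
termination_by (j + 1 - k).toNat
decreasing_by omega

def calc_sequence_sum (i : Int) (j : Int) (k : Int) : Int :=
  pvLoopDown (j - 1) k (pvLoopUp i j 0)

-- ===== PORT B =====
-- range_sum(a, b): sum of a..b inclusive via (a+b)*(b-a+1)//2, 0 if empty
def pvRangeSum (a b : Int) : Int :=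
  if a ≤ b then PySem.Int.floordiv ((a + b) * (b - a + 1)) 2 else 0

def calc_sequence_sum_alt (i : Int) (j : Int) (k : Int) : Int :=
  pvRangeSum i j + pvRangeSum k (j - 1)

-- ===== PRECONDITION & SPEC =====
def Spec_calc_sequence_sum (i : Int) (j : Int) (k : Int) (out : Int) : Prop := out = calc_sequence_sum_alt i j k
instance (i : Int) (j : Int) (k : Int) (out : Int) : Decidable (Spec_calc_sequence_sum i j k out) := by unfold Spec_calc_sequence_sum; infer_instance

-- ===== CLAIM (what is proved, stated in full; the proofs are below) =====
def Claim_equal_calc_sequence_sum : Prop := ∀ (i : Int) (j : Int) (k : Int), Dom_calc_sequence_sum i j k → Spec_calc_sequence_sum i j k (calc_sequence_sum i j k)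

-- ===== LEMMAS AND PROOFS =====

theorem pvHalfShift (c x : Int) :
    PySem.Int.floordiv (2 * c + x) 2 = c + PySem.Int.floordiv x 2 := by
  rw [show PySem.Int.floordiv (2 * c + x) 2 = (2 * c + x) / 2 from
        PySem.Int.floordiv_eq_ediv_of_pos (by norm_num),
      show PySem.Int.floordiv x 2 = x / 2 from
        PySem.Int.floordiv_eq_ediv_of_pos (by norm_num)]
  omega

theorem pvRangeSum_succ_lo (a b : Int) (h : a ≤ b) :
    pvRangeSum a b = a + pvRangeSum (a + 1) b := by
  unfold pvRangeSum
  by_cases h2 : a + 1 ≤ b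
  · simp only [if_pos h, if_pos h2]
    have : (a + b) * (b - a + 1) = 2 * a + (a + 1 + b) * (b - (a + 1) + 1) := by ring
    rw [this, pvHalfShift]
  · simp only [if_pos h, if_neg h2]
    have hab : a = b := by omega
    subst hab
    have : (a + a) * (a - a + 1) = 2 * a + 0 := by ring
    rw [this, pvHalfShift]
    simp [PySem.Int.floordiv]

theorem pvRangeSum_succ_hi (a b : Int) (h : a ≤ b) :
    pvRangeSum a b = b + pvRangeSum a (b - 1) := by
  unfold pvRangeSum
  by_cases h2 : a ≤ b - 1
  · simp only [if_pos h, if_pos h2]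
    have : (a + b) * (b - a + 1) = 2 * b + (a + (b - 1)) * (b - 1 - a + 1) := by ring
    rw [this, pvHalfShift]
  · simp only [if_pos h, if_neg h2]
    have hab : a = b := by omega
    subst hab
    have : (a + a) * (a - a + 1) = 2 * a + 0 := by ring
    rw [this, pvHalfShift]
    simp [PySem.Int.floordiv]

theorem pvLoopUp_eq (n : Nat) : ∀ (i j s : Int), (j + 1 - i).toNat = n →
    pvLoopUp i j s = s + pvRangeSum i j := by
  induction n with
  | zero =>
    intro i j s hn
    rw [pvLoopUp, pvRangeSum]
    have h : ¬ i ≤ j := by omega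
    simp [h]
  | succ m ih =>
    intro i j s hn
    rw [pvLoopUp]
    by_cases h : i ≤ j
    · rw [if_pos h, ih (i + 1) j (s + i) (by omega), pvRangeSum_succ_lo i j h]
      ring
    · rw [if_neg h, pvRangeSum, if_neg h]; ring

theorem pvLoopDown_eq (n : Nat) : ∀ (j k s : Int), (j + 1 - k).toNat = n →
    pvLoopDown j k s = s + pvRangeSum k j := by
  induction n with
  | zero =>
    intro j k s hn
    rw [pvLoopDown, pvRangeSum]
    have h : ¬ j ≥ k := by omega
    simp [h]
  | succ m ih =>
    intro j k s hn
    rw [pvLoopDown]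
    by_cases h : j ≥ k
    · rw [if_pos h, ih (j - 1) k (s + j) (by omega), pvRangeSum_succ_hi k j h]
      ring
    · rw [if_neg h, pvRangeSum, if_neg (by omega)]; ring

-- ===== VERDICT (by name: the statement is the Claim_ definition above) =====
theorem calc_sequence_sum_spec : Claim_equal_calc_sequence_sum := by
  intro i j k _
  unfold Spec_calc_sequence_sum calc_sequence_sum calc_sequence_sum_alt
  rw [pvLoopUp_eq (j + 1 - i).toNat i j 0 rfl,
      pvLoopDown_eq (j - 1 + 1 - k).toNat (j - 1) k _ rfl]
  ring
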